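-- pv_equiv track=rewrite | github.com/kiryong-lee/Algorithm | Codility/15-1.AbsDistinct.py | solution
-- ===== SOURCE A (Python) =====
-- def solution(A):
--     # write your code in Python 3.6
--
--     N = len(A)
--     for i in range(N):
--         if A[i] < 0:
--             A[i] = -A[i]
--         else:
--             break
--
--     A = sorted(A)
--     result = 0
--     before = -1
--     for number in A:
--         if before != number:
--             before = number
--             result += 1
--
--     return result
-- ===== SOURCE B (Python) =====
-- def solution(A):
--     # One pass, hash set of the adjusted values; no sort. (Does not mutate A,
--     # unlike the original, which negates its leading negative run in place.)
--     seen = set()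
--     neg_prefix = True
--     for x in A:
--         if neg_prefix and x < 0:
--             seen.add(-x)
--         else:
--             neg_prefix = False
--             seen.add(x)
--     return len(seen)
-- ===== Notes on version B (the rewrite author's own statement) =====
-- stated objective: faster
-- what changed: replaces negate-prefix-then-sort-then-adjacent-scan by a single pass that inserts each adjusted value into a hash set and returns its size
-- intended difference: on inputs whose adjusted values (leading negative run negated) have minimum exactly -1, A's sentinel before=-1 silently skips the first value and returns the distinct count minus one, while B returns the true distinct count, which is the intended value — e.g. on solution([0, -1]): A returns 1, B returns 2
import Mathlib
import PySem

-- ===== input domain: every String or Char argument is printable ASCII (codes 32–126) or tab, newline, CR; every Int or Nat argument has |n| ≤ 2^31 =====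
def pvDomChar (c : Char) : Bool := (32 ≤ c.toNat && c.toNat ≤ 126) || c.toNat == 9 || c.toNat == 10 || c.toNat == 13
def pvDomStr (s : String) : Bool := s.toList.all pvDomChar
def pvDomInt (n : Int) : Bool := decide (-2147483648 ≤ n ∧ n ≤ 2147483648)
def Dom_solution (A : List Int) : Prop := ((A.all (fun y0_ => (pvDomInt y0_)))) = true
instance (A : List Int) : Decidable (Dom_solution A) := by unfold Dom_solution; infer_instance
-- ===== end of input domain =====

-- B replaces sort + adjacent-scan by a single pass over a hash set (alternative algorithm);
-- equivalence is about the RETURN value only: A negates its leading negative run in place, B does not mutate.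

-- ===== PORT A =====
-- the first loop of A: negate elements while they are negative, break at the first non-negative
def negPrefix : List Int → List Int
  | [] => []
  | x :: xs => if x < 0 then (-x) :: negPrefix xs else x :: xs

def solution (A : List Int) : Int :=
  let A' := PySem.List.sorted (negPrefix A) (fun x => x) false
  (A'.foldl (fun (s : Int × Int) number =>
      if s.2 != number then (s.1 + 1, number) else s) (0, -1)).1

-- ===== PORT B =====
def stepB (s : PySem.Set Int × Bool) (x : Int) : PySem.Set Int × Bool :=
  if s.2 && decide (x < 0) then (PySem.Set.add s.1 (-x), true)
  else (PySem.Set.add s.1 x, false)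

def solution_alt (A : List Int) : Int :=
  ((A.foldl stepB (PySem.Set.empty, true)).1.length : Int)

-- ===== PRECONDITION & SPEC =====
-- On inputs whose adjusted values (leading negative run negated) have minimum exactly -1,
-- A's sentinel before = -1 silently skips the first value and returns the distinct count
-- minus one, while B returns the true distinct count, which is the intended value.
def D_solution (A : List Int) : Prop :=
  (-1 : Int) ∈ A.dropWhile (fun x => decide (x < 0)) ∧
    ∀ x ∈ A.dropWhile (fun x => decide (x < 0)), (-1 : Int) ≤ x
instance (A : List Int) : Decidable (D_solution A) := by unfold D_solution; infer_instance

def Spec_solution (A : List Int) (out : Int) : Prop := ¬ D_solution A → out = solution_alt A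
instance (A : List Int) (out : Int) : Decidable (Spec_solution A out) := by unfold Spec_solution; infer_instance

def pvDiffWitness_solution : List Int := [0, -1]
def pvDiffWitnessOut_solution : Int × Int := (1, 2)

-- ===== CLAIM (what is proved, stated in full; the proofs are below) =====
def Claim_unchanged_solution : Prop := ∀ (A : List Int), Dom_solution A → Spec_solution A (solution A)
def Claim_changed_solution : Prop := Dom_solution (pvDiffWitness_solution) ∧ D_solution (pvDiffWitness_solution) ∧ solution (pvDiffWitness_solution) = pvDiffWitnessOut_solution.1 ∧ solution_alt (pvDiffWitness_solution) = pvDiffWitnessOut_solution.2 ∧ pvDiffWitnessOut_solution.1 ≠ pvDiffWitnessOut_solution.2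
def Claim_exact_solution : Prop := ∀ (A : List Int), Dom_solution A → D_solution A → solution A ≠ solution_alt A

-- ===== LEMMAS AND PROOFS =====

-- A's prefix loop in takeWhile/dropWhile form
theorem negPrefix_eq (A : List Int) :
    negPrefix A = (A.takeWhile (fun x => decide (x < 0))).map Neg.neg ++
      A.dropWhile (fun x => decide (x < 0)) := by
  induction A with
  | nil => rfl
  | cons x xs ih =>
    by_cases h : x < 0 <;>
      simp [negPrefix, h, ih]

-- membership / bound bridge: D_solution in terms of negPrefix
theorem D_iff (A : List Int) :
    D_solution A ↔ ((-1 : Int) ∈ negPrefix A ∧ ∀ x ∈ negPrefix A, (-1 : Int) ≤ x) := by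
  rw [D_solution, negPrefix_eq]
  constructor
  · rintro ⟨h1, h2⟩
    refine ⟨by simp [h1], ?_⟩
    intro x hx
    rcases List.mem_append.1 hx with hx | hx
    · rcases List.mem_map.1 hx with ⟨y, hy, rfl⟩
      have hy0 : y < 0 := by simpa using List.mem_takeWhile_imp hy
      omega
    · exact h2 x hx
  · rintro ⟨h1, h2⟩
    rcases List.mem_append.1 h1 with h1' | h1'
    · rcases List.mem_map.1 h1' with ⟨y, hy, hy1⟩
      have hy0 : y < 0 := by simpa using List.mem_takeWhile_imp hy
      omega
    · exact ⟨h1', fun x hx => h2 x (List.mem_append.2 (Or.inr hx))⟩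

-- A's counting loop, state (result, before), as a recursive count
def scanCount : List Int → Int → Int
  | [], _ => 0
  | x :: xs, b => (if b ≠ x then 1 else 0) + scanCount xs x

theorem foldA_eq (S : List Int) : ∀ (r b : Int),
    (S.foldl (fun (s : Int × Int) number =>
        if s.2 != number then (s.1 + 1, number) else s) (r, b)).1 = r + scanCount S b := by
  induction S with
  | nil => intro r b; simp [scanCount]
  | cons x xs ih =>
    intro r b
    rw [List.foldl_cons]
    by_cases h : b = x
    · rw [if_neg (by simp [h])]
      rw [ih r b]
      simp [scanCount, h]
    · rw [if_pos (by simp [bne_iff_ne, h])]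
      rw [ih (r + 1) x]
      simp [scanCount, h]
      omega

-- the scan on a sorted list, started below every element
theorem scanCount_sorted_le (S : List Int) : ∀ (b : Int),
    S.Pairwise (· ≤ ·) → (∀ x ∈ S, b ≤ x) →
    scanCount S b = (S.dedup.length : Int) - (if b ∈ S then 1 else 0) := by
  induction S with
  | nil => intro b _ _; simp [scanCount]
  | cons x xs ih =>
    intro b hp hb
    have hpx : ∀ y ∈ xs, x ≤ y := (List.pairwise_cons.1 hp).1
    have hbx : b ≤ x := hb x (List.mem_cons_self ..)
    have ihx := ih x (List.pairwise_cons.1 hp).2 hpx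
    have hmem : b ∈ x :: xs ↔ b = x := by
      constructor
      · intro h
        rcases List.mem_cons.1 h with h | h
        · exact h
        · have := hpx b h; omega
      · intro h; simp [h]
    by_cases hx : x ∈ xs
    · rw [List.dedup_cons_of_mem hx]
      by_cases hbx' : b = x <;> simp [scanCount, hbx', hmem, hx, ihx]
    · rw [List.dedup_cons_of_notMem hx]
      by_cases hbx' : b = x <;> simp [scanCount, hbx', hmem, hx, ihx]
      omega

-- the scan on a sorted list whose head is not the sentinel counts every distinct value
theorem scanCount_sorted_ne_head (S : List Int) (b : Int)
    (hp : S.Pairwise (· ≤ ·)) (hh : ∀ x, S.head? = some x → x ≠ b) :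
    scanCount S b = (S.dedup.length : Int) := by
  cases S with
  | nil => simp [scanCount]
  | cons x xs =>
    have hxb : x ≠ b := hh x rfl
    have hpx : ∀ y ∈ xs, x ≤ y := (List.pairwise_cons.1 hp).1
    have := scanCount_sorted_le xs x (List.pairwise_cons.1 hp).2 hpx
    by_cases hx : x ∈ xs
    · rw [List.dedup_cons_of_mem hx]
      simp [scanCount, Ne.symm hxb, this, hx]
    · rw [List.dedup_cons_of_notMem hx]
      simp [scanCount, Ne.symm hxb, this, hx]
      omega

-- distinct count: PySem set size = Mathlib dedup length
theorem ofList_length_eq_dedup (l : List Int) :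
    (PySem.Set.ofList l).length = l.dedup.length := by
  refine List.Perm.length_eq ?_
  rw [List.perm_ext_iff_of_nodup (PySem.Set.nodup_ofList l) l.nodup_dedup]
  intro a
  simp [PySem.Set.mem_ofList, List.mem_dedup]

-- B's loop once the flag has dropped
theorem foldB_false (xs : List Int) : ∀ (s : PySem.Set Int),
    xs.foldl stepB (s, false) = (PySem.Set.update s xs, false) := by
  induction xs with
  | nil => intro s; simp [PySem.Set.update_nil]
  | cons x xs ih =>
    intro s
    simp [stepB, List.foldl_cons, ih, PySem.Set.update_cons]

-- B's loop with the flag still up follows negPrefix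
theorem foldB_true (xs : List Int) : ∀ (s : PySem.Set Int),
    (xs.foldl stepB (s, true)).1 = PySem.Set.update s (negPrefix xs) := by
  induction xs with
  | nil => intro s; simp [PySem.Set.update_nil, negPrefix]
  | cons x xs ih =>
    intro s
    by_cases h : x < 0
    · simp [stepB, List.foldl_cons, h, negPrefix, ih, PySem.Set.update_cons]
    · simp [stepB, List.foldl_cons, h, negPrefix, foldB_false, PySem.Set.update_cons]

theorem solution_alt_eq (A : List Int) :
    solution_alt A = (((negPrefix A).dedup.length : Nat) : Int) := by
  rw [solution_alt, foldB_true]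
  rw [show PySem.Set.update PySem.Set.empty (negPrefix A) = PySem.Set.ofList (negPrefix A)
      from PySem.Set.update_nil_left _]
  rw [ofList_length_eq_dedup]

theorem solution_eq_scan (A : List Int) :
    solution A = scanCount (PySem.List.sorted (negPrefix A) (fun x => x) false) (-1) := by
  rw [solution]
  rw [foldA_eq]
  omega

-- head of the sorted adjusted list is -1 exactly on D_solution
theorem head_sorted (A : List Int) (x : Int) (t : List Int)
    (h : PySem.List.sorted (negPrefix A) (fun x => x) false = x :: t) (hx : x = -1) :
    D_solution A := by
  rw [D_iff]
  subst hx
  have hmem : (-1 : Int) ∈ negPrefix A := by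
    have : (-1 : Int) ∈ PySem.List.sorted (negPrefix A) (fun x => x) false := by
      rw [h]; exact List.mem_cons_self ..
    rwa [PySem.List.mem_sorted] at this
  exact ⟨hmem, fun y hy => by simpa using PySem.List.key_head_sorted_le (negPrefix A) (fun x => x) h y hy⟩

-- ===== VERDICT (by name: the statement is the Claim_ definition above) =====
theorem solution_spec : Claim_unchanged_solution := by
  intro A _ hD
  rw [solution_eq_scan, solution_alt_eq]
  set S := PySem.List.sorted (negPrefix A) (fun x => x) false with hS
  have hp : S.Pairwise (· ≤ ·) := by
    simpa using PySem.List.sorted_pairwise (negPrefix A) (fun x => x)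
  have hperm : S.Perm (negPrefix A) := PySem.List.sorted_perm ..
  rw [scanCount_sorted_ne_head S (-1) hp ?_]
  · rw [hperm.dedup.length_eq]
  · intro x hx hx1
    obtain ⟨t, hT⟩ := List.head?_eq_some_iff.mp hx
    refine hD (head_sorted A x t ?_ hx1)
    rw [← hS, hT]

theorem solution_changed : Claim_changed_solution := by
  unfold Claim_changed_solution; decide

theorem solution_tight : Claim_exact_solution := by
  intro A _ hD
  rw [solution_eq_scan, solution_alt_eq]
  set S := PySem.List.sorted (negPrefix A) (fun x => x) false with hS
  have hp : S.Pairwise (· ≤ ·) := by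
    simpa using PySem.List.sorted_pairwise (negPrefix A) (fun x => x)
  have hperm : S.Perm (negPrefix A) := PySem.List.sorted_perm ..
  rw [D_iff] at hD
  have hmemS : (-1 : Int) ∈ S := by rw [hS, PySem.List.mem_sorted]; exact hD.1
  have hle : ∀ x ∈ S, (-1 : Int) ≤ x := by
    intro x hx
    exact hD.2 x (by rwa [hS, PySem.List.mem_sorted] at hx)
  rw [scanCount_sorted_le S (-1) hp hle, if_pos hmemS, hperm.dedup.length_eq]
  omega
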